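-- pv_equiv track=rewrite | github.com/ZG21/Algorithm-Checker | services/IsBipartitionGraph.py | find_components_and_check_bipartite
-- ===== SOURCE A (Python) =====
-- def dfs1(node, graph, visited, component):
--     visited.add(node)
--     component.append(node)
--     for neighbour in graph.get(node, []):
--         if neighbour not in visited:
--             dfs1(neighbour, graph, visited, component)
--
-- def is_bipartite_dfs(node, graph, color, c, set1, set2):
--     if node in color:
--         return color[node] == c
--     color[node] = c
--     if c:
--         set1.add(node)
--     else:
--         set2.add(node)
--     for neighbour in graph.get(node, []):
--         if not is_bipartite_dfs(neighbour, graph, color, not c, set1, set2):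
--             return False
--     return True
--
-- def find_components_and_check_bipartite(graph):
--     visited = set()
--     components = []
--     color = {}
--     sets = []  # Lista para almacenar los conjuntos de nodos bipartitos
--     is_bipartite = True
--
--     for node in graph:
--         if node not in visited:
--             component = []
--             set1, set2 = set(), set()  # Conjuntos para los dos "colores"
--             dfs1(node, graph, visited, component)
--             components.append(component)
--             if not is_bipartite_dfs(node, graph, color, True, set1, set2):
--                 is_bipartite = False
--                 break  # Un componente no bipartito es suficiente para detener el proceso
--             sets.append([set1, set2])  # Agregar los conjuntos de este componente
--
--     return components, is_bipartite, sets
-- ===== SOURCE B (Python) =====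
-- def find_components_and_check_bipartite(graph):
--     visited = set()
--     components = []
--     color = {}
--     sets = []
--     is_bipartite = True
--
--     def dfs(node, c, component, set1, set2):
--         # one pass: record the component, colour the node, check edges
--         visited.add(node)
--         color[node] = c
--         component.append(node)
--         if c:
--             set1.add(node)
--         else:
--             set2.add(node)
--         ok = True
--         for neighbour in graph.get(node, []):
--             if neighbour not in visited:
--                 if not dfs(neighbour, not c, component, set1, set2):
--                     ok = False
--             elif color[neighbour] == c:
--                 ok = False
--         return ok
--
--     for node in graph:
--         if node not in visited:
--             component, set1, set2 = [], set(), set()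
--             ok = dfs(node, True, component, set1, set2)
--             components.append(component)
--             if not ok:
--                 is_bipartite = False
--                 break
--             sets.append([set1, set2])
--
--     return components, is_bipartite, sets
-- ===== Notes on version B (the rewrite author's own statement) =====
-- stated objective: simpler
-- what changed: The two separate recursive DFS passes per component (dfs1 to collect the component, then is_bipartite_dfs to colour and check) are fused into one recursive DFS that visits each node once, collecting the component, assigning colours and flagging monochromatic edges in a single traversal.
import Mathlib
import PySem

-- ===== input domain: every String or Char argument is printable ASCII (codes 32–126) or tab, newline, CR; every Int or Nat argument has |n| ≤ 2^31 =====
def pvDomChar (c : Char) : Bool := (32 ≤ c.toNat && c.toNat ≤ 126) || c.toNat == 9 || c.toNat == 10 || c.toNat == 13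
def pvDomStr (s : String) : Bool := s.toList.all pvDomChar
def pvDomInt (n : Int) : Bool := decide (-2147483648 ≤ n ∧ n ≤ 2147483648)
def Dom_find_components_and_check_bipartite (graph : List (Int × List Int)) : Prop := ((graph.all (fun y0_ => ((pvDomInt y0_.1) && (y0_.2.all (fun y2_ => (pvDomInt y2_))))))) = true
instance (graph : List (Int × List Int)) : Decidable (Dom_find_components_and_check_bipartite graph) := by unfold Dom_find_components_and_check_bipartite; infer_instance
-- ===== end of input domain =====

-- B fuses A's two recursive DFS passes per component (component collection, then colouring/check)
-- into one DFS doing both at once; equal return value, objective: simpler.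

-- ===== PORT A =====
-- dfs1: recursive DFS collecting the component (fuel is only a totality guard; it is
-- chosen large enough in the entry point that it is never exhausted on real runs).
mutual
def pvDfs1 (fuel : Nat) (graph : List (Int × List Int)) (node : Int)
    (visited : PySem.Set Int) (component : List Int) : PySem.Set Int × List Int :=
  match fuel with
  | 0 => (visited, component)
  | f+1 =>
    pvDfs1L f graph ((PySem.Dict.mk graph).getD node [])
      (PySem.Set.add visited node) (component ++ [node])
def pvDfs1L (fuel : Nat) (graph : List (Int × List Int)) (nbs : List Int)
    (visited : PySem.Set Int) (component : List Int) : PySem.Set Int × List Int :=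
  match fuel with
  | 0 => (visited, component)
  | f+1 =>
    match nbs with
    | [] => (visited, component)
    | nb :: rest =>
      if PySem.Set.contains visited nb then pvDfs1L (f+1) graph rest visited component
      else
        let st := pvDfs1 (f+1) graph nb visited component
        pvDfs1L (f+1) graph rest st.1 st.2
end

-- is_bipartite_dfs: second recursive DFS colouring nodes and checking edges, with early return on conflict
mutual
def pvIsB (fuel : Nat) (graph : List (Int × List Int)) (node : Int) (c : Bool)
    (color : PySem.Dict Int Bool) (s1 s2 : PySem.Set Int) :
    Bool × PySem.Dict Int Bool × PySem.Set Int × PySem.Set Int :=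
  match fuel with
  | 0 => (true, color, s1, s2)
  | f+1 =>
    match color.get? node with
    | some cc => (cc == c, color, s1, s2)
    | none =>
      let color' := color.insert node c
      let s1' := if c then PySem.Set.add s1 node else s1
      let s2' := if c then s2 else PySem.Set.add s2 node
      pvIsBL f graph ((PySem.Dict.mk graph).getD node []) (!c) color' s1' s2'
def pvIsBL (fuel : Nat) (graph : List (Int × List Int)) (nbs : List Int) (c : Bool)
    (color : PySem.Dict Int Bool) (s1 s2 : PySem.Set Int) :
    Bool × PySem.Dict Int Bool × PySem.Set Int × PySem.Set Int :=
  match fuel with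
  | 0 => (true, color, s1, s2)
  | f+1 =>
    match nbs with
    | [] => (true, color, s1, s2)
    | nb :: rest =>
      let r := pvIsB (f+1) graph nb c color s1 s2
      if r.1 then pvIsBL (f+1) graph rest c r.2.1 r.2.2.1 r.2.2.2 else r
end

def pvMainA (fuel : Nat) (graph pairs : List (Int × List Int)) (visited : PySem.Set Int)
    (color : PySem.Dict Int Bool) (components : List (List Int))
    (sets : List (List (List Int))) : List (List Int) × Bool × List (List (List Int)) :=
  match pairs with
  | [] => (components, true, sets)
  | (node, _) :: rest =>
    if PySem.Set.contains visited node then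
      pvMainA fuel graph rest visited color components sets
    else
      let d := pvDfs1 fuel graph node visited []
      let comps' := components ++ [d.2]
      let r := pvIsB fuel graph node true color PySem.Set.empty PySem.Set.empty
      if r.1 then
        pvMainA fuel graph rest d.1 r.2.1 comps' (sets ++ [[r.2.2.1, r.2.2.2]])
      else (comps', false, sets)

def find_components_and_check_bipartite (graph : List (Int × List Int)) :
    List (List Int) × Bool × List (List (List Int)) :=
  pvMainA (graph.length + (graph.map (fun p => p.2.length)).sum + 1) graph graph
    PySem.Set.empty PySem.Dict.empty [] []

-- ===== PORT B =====
-- shared mutable state of B's single DFS (visited, color, current component, the two colour classes)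
structure BSt where
  visited : PySem.Set Int
  color : PySem.Dict Int Bool
  comp : List Int
  s1 : PySem.Set Int
  s2 : PySem.Set Int
deriving Repr, DecidableEq

-- the single DFS: visit, colour, record, and check neighbours' colours, in one pass (no early exit)
mutual
def pvBDfs (fuel : Nat) (graph : List (Int × List Int)) (node : Int) (c : Bool)
    (st : BSt) : BSt × Bool :=
  match fuel with
  | 0 => (st, true)
  | f+1 =>
    pvBDfsL f graph ((PySem.Dict.mk graph).getD node []) c
      { visited := PySem.Set.add st.visited node,
        color := st.color.insert node c,
        comp := st.comp ++ [node],
        s1 := if c then PySem.Set.add st.s1 node else st.s1,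
        s2 := if c then st.s2 else PySem.Set.add st.s2 node }
def pvBDfsL (fuel : Nat) (graph : List (Int × List Int)) (nbs : List Int) (c : Bool)
    (st : BSt) : BSt × Bool :=
  match fuel with
  | 0 => (st, true)
  | f+1 =>
    match nbs with
    | [] => (st, true)
    | nb :: rest =>
      if PySem.Set.contains st.visited nb then
        let ok1 := !(st.color.get? nb == some c)
        let r := pvBDfsL (f+1) graph rest c st
        (r.1, ok1 && r.2)
      else
        let r := pvBDfs (f+1) graph nb (!c) st
        let r2 := pvBDfsL (f+1) graph rest c r.1
        (r2.1, r.2 && r2.2)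
end

def pvMainB (fuel : Nat) (graph pairs : List (Int × List Int)) (visited : PySem.Set Int)
    (color : PySem.Dict Int Bool) (components : List (List Int))
    (sets : List (List (List Int))) : List (List Int) × Bool × List (List (List Int)) :=
  match pairs with
  | [] => (components, true, sets)
  | (node, _) :: rest =>
    if PySem.Set.contains visited node then
      pvMainB fuel graph rest visited color components sets
    else
      let r := pvBDfs fuel graph node true
        ⟨visited, color, [], PySem.Set.empty, PySem.Set.empty⟩
      let comps' := components ++ [r.1.comp]
      if r.2 then
        pvMainB fuel graph rest r.1.visited r.1.color comps' (sets ++ [[r.1.s1, r.1.s2]])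
      else (comps', false, sets)

def find_components_and_check_bipartite_alt (graph : List (Int × List Int)) :
    List (List Int) × Bool × List (List (List Int)) :=
  pvMainB (graph.length + (graph.map (fun p => p.2.length)).sum + 1) graph graph
    PySem.Set.empty PySem.Dict.empty [] []

-- ===== PRECONDITION & SPEC =====
def Spec_find_components_and_check_bipartite (graph : List (Int × List Int)) (out : List (List Int) × Bool × List (List (List Int))) : Prop := out = find_components_and_check_bipartite_alt graph
instance (graph : List (Int × List Int)) (out : List (List Int) × Bool × List (List (List Int))) : Decidable (Spec_find_components_and_check_bipartite graph out) := by unfold Spec_find_components_and_check_bipartite; infer_instance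

-- ===== CLAIM (what is proved, stated in full; the proofs are below) =====
def Claim_equal_find_components_and_check_bipartite : Prop := ∀ (graph : List (Int × List Int)), Dom_find_components_and_check_bipartite graph → Spec_find_components_and_check_bipartite graph (find_components_and_check_bipartite graph)

-- ===== LEMMAS AND PROOFS =====

-- invariant: the visited set and the colour dict hold exactly the same nodes
def pvSK (v : PySem.Set Int) (col : PySem.Dict Int Bool) : Prop :=
  ∀ x : Int, PySem.Set.contains v x = col.contains x

theorem pvSK_step (v : PySem.Set Int) (col : PySem.Dict Int Bool) (n : Int) (c : Bool)
    (h : pvSK v col) : pvSK (PySem.Set.add v n) (col.insert n c) := by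
  intro x
  have h1 : (PySem.Set.add v n).contains x = (v.contains x || x == n) := by
    by_cases hx : x = n <;> simp [PySem.Set.add, PySem.Set.contains, hx] <;> split_ifs <;> simp_all
  have h2 : (col.insert n c).contains x = (col.contains x || x == n) := by
    rw [PySem.Dict.contains_eq_isSome_get?, PySem.Dict.contains_eq_isSome_get?,
        PySem.Dict.get?_insert]
    by_cases hx : x = n <;> simp [hx]
  rw [h1, h2, h x]

theorem pvL1 (f : Nat) :
    (∀ graph node c v col comp s1 s2,
      ((pvBDfs f graph node c ⟨v, col, comp, s1, s2⟩).1.visited,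
       (pvBDfs f graph node c ⟨v, col, comp, s1, s2⟩).1.comp) = pvDfs1 f graph node v comp)
    ∧ (∀ graph nbs c v col comp s1 s2,
      ((pvBDfsL f graph nbs c ⟨v, col, comp, s1, s2⟩).1.visited,
       (pvBDfsL f graph nbs c ⟨v, col, comp, s1, s2⟩).1.comp) = pvDfs1L f graph nbs v comp) := by
  induction f with
  | zero =>
    constructor
    · intro graph node c v col comp s1 s2; simp [pvBDfs, pvDfs1]
    · intro graph nbs c v col comp s1 s2; simp [pvBDfsL, pvDfs1L]
  | succ f ih =>
    have hout : ∀ graph node c v col comp s1 s2,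
        ((pvBDfs (f+1) graph node c ⟨v, col, comp, s1, s2⟩).1.visited,
         (pvBDfs (f+1) graph node c ⟨v, col, comp, s1, s2⟩).1.comp)
          = pvDfs1 (f+1) graph node v comp := by
      intro graph node c v col comp s1 s2
      simp only [pvBDfs, pvDfs1]
      exact ih.2 graph _ c _ _ _ _ _
    refine ⟨hout, ?_⟩
    intro graph nbs c v col comp s1 s2
    induction nbs generalizing c v col comp s1 s2 with
    | nil => simp [pvBDfsL, pvDfs1L]
    | cons nb rest ihn =>
      by_cases hv : PySem.Set.contains v nb
      · simp only [pvBDfsL, pvDfs1L, hv, if_true]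
        exact ihn c v col comp s1 s2
      · simp only [pvBDfsL, pvDfs1L, hv, if_false, Bool.false_eq_true]
        have hout' := hout graph nb (!c) v col comp s1 s2
        have h1 : (pvBDfs (f+1) graph nb (!c) ⟨v, col, comp, s1, s2⟩).1.visited
            = (pvDfs1 (f+1) graph nb v comp).1 := by
          rw [← hout']
        have h2 : (pvBDfs (f+1) graph nb (!c) ⟨v, col, comp, s1, s2⟩).1.comp
            = (pvDfs1 (f+1) graph nb v comp).2 := by
          rw [← hout']
        rw [← h1, ← h2]
        exact ihn c (pvBDfs (f+1) graph nb (!c) ⟨v, col, comp, s1, s2⟩).1.visited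
          (pvBDfs (f+1) graph nb (!c) ⟨v, col, comp, s1, s2⟩).1.color
          (pvBDfs (f+1) graph nb (!c) ⟨v, col, comp, s1, s2⟩).1.comp
          (pvBDfs (f+1) graph nb (!c) ⟨v, col, comp, s1, s2⟩).1.s1
          (pvBDfs (f+1) graph nb (!c) ⟨v, col, comp, s1, s2⟩).1.s2

theorem pvL2 (f : Nat) :
    (∀ graph node c v col comp s1 s2, pvSK v col → col.contains node = false →
      (pvBDfs f graph node c ⟨v, col, comp, s1, s2⟩).2 = (pvIsB f graph node c col s1 s2).1
      ∧ ((pvIsB f graph node c col s1 s2).1 = true →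
          (pvBDfs f graph node c ⟨v, col, comp, s1, s2⟩).1.color = (pvIsB f graph node c col s1 s2).2.1
          ∧ (pvBDfs f graph node c ⟨v, col, comp, s1, s2⟩).1.s1 = (pvIsB f graph node c col s1 s2).2.2.1
          ∧ (pvBDfs f graph node c ⟨v, col, comp, s1, s2⟩).1.s2 = (pvIsB f graph node c col s1 s2).2.2.2
          ∧ pvSK (pvBDfs f graph node c ⟨v, col, comp, s1, s2⟩).1.visited
              (pvBDfs f graph node c ⟨v, col, comp, s1, s2⟩).1.color))
    ∧ (∀ graph nbs c v col comp s1 s2, pvSK v col →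
      (pvBDfsL f graph nbs (!c) ⟨v, col, comp, s1, s2⟩).2 = (pvIsBL f graph nbs c col s1 s2).1
      ∧ ((pvIsBL f graph nbs c col s1 s2).1 = true →
          (pvBDfsL f graph nbs (!c) ⟨v, col, comp, s1, s2⟩).1.color = (pvIsBL f graph nbs c col s1 s2).2.1
          ∧ (pvBDfsL f graph nbs (!c) ⟨v, col, comp, s1, s2⟩).1.s1 = (pvIsBL f graph nbs c col s1 s2).2.2.1
          ∧ (pvBDfsL f graph nbs (!c) ⟨v, col, comp, s1, s2⟩).1.s2 = (pvIsBL f graph nbs c col s1 s2).2.2.2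
          ∧ pvSK (pvBDfsL f graph nbs (!c) ⟨v, col, comp, s1, s2⟩).1.visited
              (pvBDfsL f graph nbs (!c) ⟨v, col, comp, s1, s2⟩).1.color)) := by
  induction f with
  | zero =>
    constructor
    · intro graph node c v col comp s1 s2 hsk hcol
      exact ⟨by simp [pvBDfs, pvIsB], fun _ => ⟨by simp [pvBDfs, pvIsB],
        by simp [pvBDfs, pvIsB], by simp [pvBDfs, pvIsB],
        by simpa [pvBDfs, pvIsB] using hsk⟩⟩
    · intro graph nbs c v col comp s1 s2 hsk
      exact ⟨by simp [pvBDfsL, pvIsBL], fun _ => ⟨by simp [pvBDfsL, pvIsBL],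
        by simp [pvBDfsL, pvIsBL], by simp [pvBDfsL, pvIsBL],
        by simpa [pvBDfsL, pvIsBL] using hsk⟩⟩
  | succ f ih =>
    have hout : ∀ graph node c v col comp s1 s2, pvSK v col → col.contains node = false →
        (pvBDfs (f+1) graph node c ⟨v, col, comp, s1, s2⟩).2 = (pvIsB (f+1) graph node c col s1 s2).1
        ∧ ((pvIsB (f+1) graph node c col s1 s2).1 = true →
            (pvBDfs (f+1) graph node c ⟨v, col, comp, s1, s2⟩).1.color = (pvIsB (f+1) graph node c col s1 s2).2.1
            ∧ (pvBDfs (f+1) graph node c ⟨v, col, comp, s1, s2⟩).1.s1 = (pvIsB (f+1) graph node c col s1 s2).2.2.1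
            ∧ (pvBDfs (f+1) graph node c ⟨v, col, comp, s1, s2⟩).1.s2 = (pvIsB (f+1) graph node c col s1 s2).2.2.2
            ∧ pvSK (pvBDfs (f+1) graph node c ⟨v, col, comp, s1, s2⟩).1.visited
                (pvBDfs (f+1) graph node c ⟨v, col, comp, s1, s2⟩).1.color) := by
      intro graph node c v col comp s1 s2 hsk hcol
      have hget : col.get? node = none := by
        have h := PySem.Dict.contains_eq_isSome_get? col node
        rw [hcol] at h
        cases hg : col.get? node with
        | none => rfl
        | some cc => rw [hg] at h; simp at h
      simp only [pvBDfs, pvIsB, hget]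
      have := ih.2 graph ((PySem.Dict.mk graph).getD node []) (!c)
        (PySem.Set.add v node) (col.insert node c) (comp ++ [node])
        (if c then PySem.Set.add s1 node else s1) (if c then s2 else PySem.Set.add s2 node)
        (pvSK_step v col node c hsk)
      simpa [Bool.not_not] using this
    refine ⟨hout, ?_⟩
    intro graph nbs c v col comp s1 s2 hsk
    induction nbs generalizing c v col comp s1 s2 with
    | nil =>
      exact ⟨by simp [pvBDfsL, pvIsBL], fun _ => ⟨by simp [pvBDfsL, pvIsBL],
        by simp [pvBDfsL, pvIsBL], by simp [pvBDfsL, pvIsBL],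
        by simpa [pvBDfsL, pvIsBL] using hsk⟩⟩
    | cons nb rest ihn =>
      by_cases hv : PySem.Set.contains v nb
      · have hcv : col.contains nb = true := by rw [← hsk nb]; exact hv
        obtain ⟨cc, hg⟩ : ∃ cc, col.get? nb = some cc := by
          have h := PySem.Dict.contains_eq_isSome_get? col nb
          rw [hcv] at h
          cases hgg : col.get? nb with
          | none => rw [hgg] at h; simp at h
          | some cc => exact ⟨cc, rfl⟩
        by_cases hcc : cc = c
        · have hx : (!((some c : Option Bool) == some (!c))) = true := by cases c <;> rfl
          simp only [pvBDfsL, pvIsBL, pvIsB, hv, hg, if_true, hcc, hx, beq_self_eq_true,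
            Bool.true_and]
          exact ihn c v col comp s1 s2 hsk
        · have hx : (!((some cc : Option Bool) == some (!c))) = false := by
            cases c <;> cases cc <;> simp_all
          have hbe : (cc == c) = false := by simp [hcc]
          simp only [pvBDfsL, pvIsBL, pvIsB, hv, hg, if_true, hx, hbe, Bool.false_and,
            Bool.false_eq_true, if_false]
          exact ⟨by trivial, fun h => by simp at h⟩
      · have hcnb : col.contains nb = false := by rw [← hsk nb]; simpa using hv
        have h1 := hout graph nb c v col comp s1 s2 hsk hcnb
        simp only [pvBDfsL, pvIsBL, hv, Bool.false_eq_true, if_false, Bool.not_not]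
        by_cases ha1 : (pvIsB (f+1) graph nb c col s1 s2).1 = true
        · obtain ⟨hc, hs1, hs2, hskr⟩ := h1.2 ha1
          simp only [h1.1, ha1, if_true, Bool.true_and]
          rw [← hc, ← hs1, ← hs2]
          exact ihn c (pvBDfs (f+1) graph nb c ⟨v, col, comp, s1, s2⟩).1.visited
            (pvBDfs (f+1) graph nb c ⟨v, col, comp, s1, s2⟩).1.color
            (pvBDfs (f+1) graph nb c ⟨v, col, comp, s1, s2⟩).1.comp
            (pvBDfs (f+1) graph nb c ⟨v, col, comp, s1, s2⟩).1.s1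
            (pvBDfs (f+1) graph nb c ⟨v, col, comp, s1, s2⟩).1.s2 hskr
        · have ha0 : (pvIsB (f+1) graph nb c col s1 s2).1 = false := by
            simpa using ha1
          simp [h1.1, ha0]

theorem pvMainSim (pairs : List (Int × List Int)) :
    ∀ (f : Nat) (graph : List (Int × List Int)) v col components sets, pvSK v col →
      pvMainA f graph pairs v col components sets = pvMainB f graph pairs v col components sets := by
  induction pairs with
  | nil => intro f graph v col components sets _; simp [pvMainA, pvMainB]
  | cons p rest ih =>
    intro f graph v col components sets hsk
    obtain ⟨node, adj⟩ := p
    by_cases hv : PySem.Set.contains v node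
    · simp only [pvMainA, pvMainB, hv, if_true]
      exact ih f graph v col components sets hsk
    · have hcol : col.contains node = false := by rw [← hsk node]; simpa using hv
      have h1 := (pvL1 f).1 graph node true v col [] PySem.Set.empty PySem.Set.empty
      have h2 := (pvL2 f).1 graph node true v col [] PySem.Set.empty PySem.Set.empty hsk hcol
      have e1 : (pvDfs1 f graph node v []).1
          = (pvBDfs f graph node true ⟨v, col, [], PySem.Set.empty, PySem.Set.empty⟩).1.visited := by
        rw [← h1]
      have e2 : (pvDfs1 f graph node v []).2
          = (pvBDfs f graph node true ⟨v, col, [], PySem.Set.empty, PySem.Set.empty⟩).1.comp := by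
        rw [← h1]
      simp only [pvMainA, pvMainB, hv, Bool.false_eq_true, if_false]
      by_cases ha : (pvIsB f graph node true col PySem.Set.empty PySem.Set.empty).1 = true
      · obtain ⟨hc, hs1, hs2, hskr⟩ := h2.2 ha
        have hb : (pvBDfs f graph node true ⟨v, col, [], PySem.Set.empty, PySem.Set.empty⟩).2 = true := by
          rw [h2.1, ha]
        simp only [ha, hb, if_true]
        rw [e1, e2, ← hc, ← hs1, ← hs2]
        exact ih f graph _ _ _ _ hskr
      · have ha0 : (pvIsB f graph node true col PySem.Set.empty PySem.Set.empty).1 = false := by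
          simpa using ha
        have hb : (pvBDfs f graph node true ⟨v, col, [], PySem.Set.empty, PySem.Set.empty⟩).2 = false := by
          rw [h2.1, ha0]
        simp only [ha0, hb, Bool.false_eq_true, if_false]
        rw [e2]

-- ===== VERDICT (by name: the statement is the Claim_ definition above) =====
theorem find_components_and_check_bipartite_spec : Claim_equal_find_components_and_check_bipartite := by
  intro graph _
  unfold Spec_find_components_and_check_bipartite
  unfold find_components_and_check_bipartite find_components_and_check_bipartite_alt
  exact pvMainSim graph _ graph _ _ [] [] (fun x => rfl)
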